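-- pv_equiv track=rewrite | github.com/hrishikeshpaul/IJK-Game | ai_IJK.py | __cover_up
-- ===== SOURCE A (Python) =====
-- def __cover_up(mat):
--     new = [[' ' for _ in range(len(mat))] for _ in
--            range(len(mat))]
--
--     done = False
--     for i in range(len(mat)):
--         count = 0
--         for j in range(len(mat)):
--             if mat[i][j] != ' ':
--                 new[i][count] = mat[i][j]
--                 if j != count:
--                     done = True
--                 count += 1
--     return (new, done)
-- ===== SOURCE B (Python) =====
-- def __cover_up(mat):
--     n = len(mat)
--     rows = [[mat[i][j] for j in range(n)] for i in range(n)]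
--     new = [sorted(r, key=' '.__eq__) for r in rows]
--     done = any(c != ' '
--                for r in rows if ' ' in r
--                for c in r[r.index(' ') + 1:])
--     return (new, done)
-- ===== Notes on version B (the rewrite author's own statement) =====
-- stated objective: alternative
-- what changed: Each row is left-compacted by a stable sort keyed on is-space (spaces sink to the end), and the done flag is computed by a separate pass that looks for a non-space after the first space of a row, replacing A's cursor-driven in-place writes and moved-cell counter.
import Mathlib
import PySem

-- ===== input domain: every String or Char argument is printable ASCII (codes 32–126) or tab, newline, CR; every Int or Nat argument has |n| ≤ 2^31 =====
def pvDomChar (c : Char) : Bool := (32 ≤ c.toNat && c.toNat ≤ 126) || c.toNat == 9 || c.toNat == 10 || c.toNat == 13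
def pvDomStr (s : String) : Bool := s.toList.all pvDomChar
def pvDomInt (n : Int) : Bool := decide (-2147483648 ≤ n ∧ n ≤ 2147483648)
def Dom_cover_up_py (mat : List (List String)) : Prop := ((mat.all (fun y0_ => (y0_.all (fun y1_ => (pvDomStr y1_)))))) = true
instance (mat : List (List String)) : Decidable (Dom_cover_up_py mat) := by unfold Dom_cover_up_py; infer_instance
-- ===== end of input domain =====

-- B compacts each row by a stable sort keyed on is-space (spaces sink to the end) and computes
-- the done flag in a separate pass (a non-space after a row's first space), replacing A's
-- preallocated grid, in-place cursor writes and moved-cell counter (objective: alternative).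

-- ===== PORT A =====
-- literal port of A: preallocated n×n grid of " ", per-row write cursor `count`,
-- `done` set when a written cell moves (j ≠ count).  mat[i][j] is read with getD;
-- Pre_ excludes exactly the inputs where Python's mat[i][j] raises IndexError.
def cover_up_py (mat : List (List String)) : List (List String) × Bool :=
  let n := mat.length
  let new0 : List (List String) :=
    (List.range n).map (fun _ => (List.range n).map (fun _ => " "))
  (List.range n).foldl
    (fun (st : List (List String) × Bool) i =>
      let inner := (List.range n).foldl
        (fun (st2 : List (List String) × Bool × Nat) j =>
          let c := (mat.getD i []).getD j " "
          if c ≠ " " then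
            (st2.1.set i ((st2.1.getD i []).set st2.2.2 c),
             st2.2.1 || decide (j ≠ st2.2.2),
             st2.2.2 + 1)
          else st2)
        (st.1, st.2, 0)
      (inner.1, inner.2.1))
    (new0, false)

-- ===== PORT B =====
-- port of B: rows = first n cells of each of the first n rows; each output row is
-- sorted(r, key=' '.__eq__) (stable, spaces last; the bool key is ported as 0/1 : Nat);
-- done = any non-space strictly after a row's first space (r.index(' ') → index?, r[f+1:] → slice).
def cover_up_py_alt (mat : List (List String)) : List (List String) × Bool :=
  let n := mat.length
  let rows := (List.range n).map (fun i => (List.range n).map (fun j => (mat.getD i []).getD j " "))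
  let new := rows.map (fun r => PySem.List.sorted r (fun c => if c = " " then (1 : Nat) else 0))
  let done := rows.any (fun r =>
    match PySem.List.index? r " " with
    | some f => (PySem.List.slice r (some ((f : Int) + 1))).any (fun c => c != " ")
    | none => false)
  (new, done)

-- ===== PRECONDITION & SPEC =====
-- Pre_ excludes exactly the ragged inputs (some row shorter than the matrix) on which
-- Python's mat[i][j] raises IndexError in A (and in B alike).
def Pre_cover_up_py (mat : List (List String)) : Prop :=
  ∀ row ∈ mat, mat.length ≤ row.length
instance (mat : List (List String)) : Decidable (Pre_cover_up_py mat) := by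
  unfold Pre_cover_up_py; infer_instance
def pvWitness_cover_up_py : List (List String) := [["2", " "], [" ", "1"]]
def Spec_cover_up_py (mat : List (List String)) (out : List (List String) × Bool) : Prop := out = cover_up_py_alt mat
instance (mat : List (List String)) (out : List (List String) × Bool) : Decidable (Spec_cover_up_py mat out) := by unfold Spec_cover_up_py; infer_instance

-- ===== CLAIM (what is proved, stated in full; the proofs are below) =====
def Claim_equal_cover_up_py : Prop := ∀ (mat : List (List String)), Dom_cover_up_py mat → Pre_cover_up_py mat → Spec_cover_up_py mat (cover_up_py mat)

-- ===== LEMMAS AND PROOFS =====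

-- the first-n-cells view of row i, shared by both analyses
def origRow (mat : List (List String)) (i : Nat) : List String :=
  (List.range mat.length).map (fun j => (mat.getD i []).getD j " ")

-- A's target row value: packed non-spaces then padding
def packRow (mat : List (List String)) (i : Nat) : List String :=
  (origRow mat i).filter (fun c => c ≠ " ") ++
    List.replicate (mat.length - ((origRow mat i).filter (fun c => c ≠ " ")).length) " "

-- A's inner-loop step, named (definitionally the lambda inside cover_up_py)
def stepAI (mat : List (List String)) (i : Nat)
    (st2 : List (List String) × Bool × Nat) (j : Nat) : List (List String) × Bool × Nat :=
  let c := (mat.getD i []).getD j " "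
  if c ≠ " " then
    (st2.1.set i ((st2.1.getD i []).set st2.2.2 c),
     st2.2.1 || decide (j ≠ st2.2.2),
     st2.2.2 + 1)
  else st2

-- A's outer-loop step
def stepAO (mat : List (List String)) (st : List (List String) × Bool) (i : Nat) :
    List (List String) × Bool :=
  let inner := List.foldl (stepAI mat i) (st.1, st.2, 0) (List.range mat.length)
  (inner.1, inner.2.1)

theorem portA_eq (mat : List (List String)) :
    cover_up_py mat = List.foldl (stepAO mat)
      ((List.range mat.length).map (fun _ => (List.range mat.length).map (fun _ => " ")), false)
      (List.range mat.length) := rfl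

-- row-level step of A's inner loop, reading cells through f
def stepR (f : Nat → String) (st : List String × Bool × Nat) (j : Nat) :
    List String × Bool × Nat :=
  let c := f j
  if c ≠ " " then (st.1.set st.2.2 c, st.2.1 || decide (j ≠ st.2.2), st.2.2 + 1)
  else st

-- write ps into r at consecutive positions starting at c
def wp (r : List String) (c : Nat) : List String → List String
  | [] => r
  | x :: xs => wp (r.set c x) (c + 1) xs

-- the "some cell moved" flag, d = current index minus current cursor
def mv (d : Nat) : List String → Bool
  | [] => false
  | x :: xs => if x ≠ " " then (decide (d ≠ 0) || mv d xs) else mv (d + 1) xs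

theorem mv_pos (xs : List String) : ∀ d : Nat, 0 < d → mv d xs = xs.any (fun c => c ≠ " ") := by
  induction xs with
  | nil => intro d _; simp [mv]
  | cons x xs ih =>
    intro d hd
    by_cases hx : x = " "
    · simp [mv, hx, ih (d + 1) (by omega)]
    · have hd' : d ≠ 0 := by omega
      simp [mv, hx, hd']

-- B's per-row done test, with the slice already rewritten to drop
def bD (r : List String) : Bool :=
  match List.idxOf? " " r with
  | some f => (r.drop (f + 1)).any (fun c => c != " ")
  | none => false

-- A's moved-flag is B's first-space test
theorem mv_zero_eq_bD (r : List String) : mv 0 r = bD r := by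
  induction r with
  | nil => simp [mv, bD, List.idxOf?]
  | cons x xs ih =>
    by_cases hx : x = " "
    · subst hx
      have h1 : mv 0 (" " :: xs) = mv 1 xs := by simp [mv]
      rw [h1, mv_pos xs 1 (by omega)]
      simp only [bD, List.idxOf?_cons, BEq.rfl, if_pos, List.drop_succ_cons, List.drop_zero]
      exact List.any_congr rfl (fun c => by by_cases hc : c = " " <;> simp [hc])
    · have h1 : mv 0 (x :: xs) = mv 0 xs := by simp [mv, hx]
      rw [h1, ih]
      unfold bD
      rw [List.idxOf?_cons]
      have hbe : (x == " ") = false := by simp [hx]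
      rw [if_neg (by simp [hbe])]
      cases h : List.idxOf? " " xs with
      | none => simp
      | some f => simp [List.drop_succ_cons]

-- A's inner loop over indices range' j m equals write-packed + moved-flag
theorem inner_fold (suffix : List String) :
    ∀ (f : Nat → String) (j c : Nat) (r : List String) (done : Bool),
    c ≤ j → (∀ t, t < suffix.length → f (j + t) = suffix.getD t " ") →
    List.foldl (stepR f) (r, done, c) (List.range' j suffix.length) =
      (wp r c (suffix.filter (fun s => s ≠ " ")),
       done || mv (j - c) suffix,
       c + (suffix.filter (fun s => s ≠ " ")).length) := by
  induction suffix with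
  | nil => intro f j c r done _ _; simp [wp, mv]
  | cons x xs ih =>
    intro f j c r done hc hf
    have hx0 : f j = x := by simpa using hf 0 (by simp)
    simp only [List.length_cons, List.range'_succ, List.foldl_cons]
    by_cases hx : x = " "
    · have hstep : stepR f (r, done, c) j = (r, done, c) := by
        simp [stepR, hx0, hx]
      rw [hstep, ih f (j+1) c r done (by omega)
        (by intro t ht
            have := hf (t+1) (by simpa using Nat.succ_lt_succ ht)
            simpa [Nat.add_comm, Nat.add_assoc, Nat.add_left_comm] using this)]
      have hfil : (x :: xs).filter (fun s => s ≠ " ") = xs.filter (fun s => s ≠ " ") := by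
        simp [hx]
      have hmv : mv (j + 1 - c) xs = mv (j - c) (x :: xs) := by
        have he : j + 1 - c = (j - c) + 1 := by omega
        simp [mv, hx, he]
      rw [hfil, hmv]
    · have hstep : stepR f (r, done, c) j =
          (r.set c x, done || decide (j ≠ c), c + 1) := by
        simp [stepR, hx0, hx]
      rw [hstep, ih f (j+1) (c+1) (r.set c x) (done || decide (j ≠ c)) (by omega)
        (by intro t ht
            have := hf (t+1) (by simpa using Nat.succ_lt_succ ht)
            simpa [Nat.add_comm, Nat.add_assoc, Nat.add_left_comm] using this)]
      have hfil : (x :: xs).filter (fun s => s ≠ " ") = x :: xs.filter (fun s => s ≠ " ") := by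
        simp [hx]
      have hmv : mv (j - c) (x :: xs) = (decide (j ≠ c) || mv (j - c) xs) := by
        have hd : (decide ((j : Nat) - c ≠ 0) : Bool) = decide (j ≠ c) := by
          rcases Nat.lt_or_ge c j with h | h
          · have h1 : j - c ≠ 0 := by omega
            have h2 : j ≠ c := by omega
            simp [h1, h2]
          · have : c = j := by omega
            simp [this]
        simp [mv, hx, hd]
      rw [hfil, hmv]
      have he : j + 1 - (c + 1) = j - c := by omega
      rw [he]
      simp [wp, Bool.or_assoc, Nat.add_assoc, Nat.add_comm]

-- writing ps after a prefix into spaces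
theorem wp_pad (ps : List String) :
    ∀ (pre : List String) (m : Nat), ps.length ≤ m →
    wp (pre ++ List.replicate m " ") pre.length ps =
      pre ++ ps ++ List.replicate (m - ps.length) " " := by
  induction ps with
  | nil => intro pre m _; simp [wp]
  | cons x xs ih =>
    intro pre m hm
    rcases m with _ | m
    · simp at hm
    have hset : (pre ++ List.replicate (m+1) " ").set pre.length x =
        (pre ++ [x]) ++ List.replicate m " " := by
      rw [List.replicate_succ, List.set_append_right _ _ (le_refl _)]
      simp
    have hstep : wp (pre ++ List.replicate (m+1) " ") pre.length (x :: xs) =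
        wp ((pre ++ [x]) ++ List.replicate m " ") (pre ++ [x]).length xs := by
      simp [wp, hset]
    rw [hstep, ih (pre ++ [x]) m (by simpa using hm)]
    simp

-- A's inner loop on the whole matrix is the row-level loop on row i, written back with set
theorem inner_matrix (mat : List (List String)) (i : Nat) (js : List Nat) :
    ∀ (new : List (List String)) (done : Bool) (c : Nat),
    List.foldl (stepAI mat i) (new, done, c) js =
      ((new.set i (List.foldl (stepR (fun j => (mat.getD i []).getD j " "))
          (new.getD i [], done, c) js).1),
       (List.foldl (stepR (fun j => (mat.getD i []).getD j " "))
          (new.getD i [], done, c) js).2.1,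
       (List.foldl (stepR (fun j => (mat.getD i []).getD j " "))
          (new.getD i [], done, c) js).2.2) := by
  induction js with
  | nil =>
    intro new done c
    simp only [List.foldl_nil]
    by_cases hi : i < new.length
    · have : new.getD i [] = new[i] := List.getD_eq_getElem new [] hi
      rw [this, List.set_getElem_self hi]
    · rw [List.set_eq_of_length_le (by omega)]
  | cons j js ih =>
    intro new done c
    simp only [List.foldl_cons]
    by_cases hx : (mat.getD i []).getD j " " = " "
    all_goals simp only [List.getD_eq_getElem?_getD] at hx
    · have h1 : stepR (fun j => (mat.getD i []).getD j " ") (new.getD i [], done, c) j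
          = (new.getD i [], done, c) := by simp [stepR, hx]
      have h2 : stepAI mat i (new, done, c) j = (new, done, c) := by
        simp [stepAI, hx]
      rw [h1, h2, ih]
    · have h1 : stepR (fun j => (mat.getD i []).getD j " ") (new.getD i [], done, c) j
          = ((new.getD i []).set c ((mat.getD i []).getD j " "), done || decide (j ≠ c), c + 1) := by
        simp [stepR, hx]
      have h2 : stepAI mat i (new, done, c) j
          = (new.set i ((new.getD i []).set c ((mat.getD i []).getD j " ")),
             done || decide (j ≠ c), c + 1) := by
        simp [stepAI, hx]
      rw [h1, h2, ih]
      by_cases hi : i < new.length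
      · have e1 : (new.set i ((new.getD i []).set c ((mat.getD i []).getD j " "))).getD i []
            = (new.getD i []).set c ((mat.getD i []).getD j " ") := by
          rw [List.getD_eq_getElem?_getD, List.getElem?_set_self (by simpa using hi)]
          rfl
        rw [e1, List.set_set]
      · have hle : new.length ≤ i := by omega
        have e0 : new.getD i [] = [] := List.getD_eq_default new [] hle
        have e1 : new.set i (([] : List String).set c ((mat.getD i []).getD j " ")) = new :=
          List.set_eq_of_length_le (by omega)
        rw [e0]
        have e2 : (([] : List String).set c ((mat.getD i []).getD j " ")) = [] := by
          simp
        rw [e2] at e1 ⊢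
        rw [e1, e0]

-- A's loop in closed form: rows by packRow, flag by mv on each origRow
theorem outer_fold (mat : List (List String)) (m : Nat) :
    ∀ (i0 : Nat) (acc : List (List String)) (done : Bool),
    acc.length = i0 → i0 + m = mat.length →
    List.foldl (stepAO mat)
      (acc ++ List.replicate m (List.replicate mat.length " "), done) (List.range' i0 m) =
    (acc ++ (List.range' i0 m).map (fun i => packRow mat i),
     done || (List.range' i0 m).any (fun i => mv 0 (origRow mat i))) := by
  induction m with
  | zero => intro i0 acc done _ _; simp
  | succ m ih =>
    intro i0 acc done hlen hsum
    rw [List.range'_succ, List.foldl_cons]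
    have horiglen : (origRow mat i0).length = mat.length := by simp [origRow]
    have hplen : ((origRow mat i0).filter (fun c => c ≠ " ")).length ≤ mat.length := by
      calc ((origRow mat i0).filter (fun c => c ≠ " ")).length
          ≤ (origRow mat i0).length := List.length_filter_le _ _
        _ = mat.length := horiglen
    have hget : (acc ++ List.replicate (m+1) (List.replicate mat.length " ")).getD i0 []
        = List.replicate mat.length " " := by
      rw [List.getD_eq_getElem?_getD, List.getElem?_append_right (by omega)]
      simp [hlen]
    have hf : ∀ t, t < (origRow mat i0).length →
        (mat.getD i0 []).getD (0 + t) " " = (origRow mat i0).getD t " " := by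
      intro t ht
      rw [horiglen] at ht
      simp only [origRow, Nat.zero_add, List.getD_eq_getElem?_getD, List.getElem?_map,
        List.getElem?_range ht]
      simp
    have hA : stepAO mat (acc ++ List.replicate (m+1) (List.replicate mat.length " "), done) i0
        = ((acc ++ [packRow mat i0]) ++ List.replicate m (List.replicate mat.length " "),
           done || mv 0 (origRow mat i0)) := by
      unfold stepAO
      rw [show List.range mat.length = List.range' 0 (origRow mat i0).length from by
          rw [horiglen, List.range_eq_range']]
      rw [inner_matrix, hget,
        inner_fold _ (fun j => (mat.getD i0 []).getD j " ") 0 0 _ done (le_refl 0) hf]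
      have hwp : wp (List.replicate mat.length " ") 0
          ((origRow mat i0).filter (fun s => s ≠ " "))
          = packRow mat i0 := by
        have := wp_pad ((origRow mat i0).filter (fun s => s ≠ " ")) [] mat.length hplen
        simpa [packRow] using this
      have hset : (acc ++ List.replicate (m+1) (List.replicate mat.length " ")).set i0
          (packRow mat i0)
          = (acc ++ [packRow mat i0]) ++ List.replicate m (List.replicate mat.length " ") := by
        rw [← hlen, List.replicate_succ, List.set_append_right _ _ (le_refl _)]
        simp
      simp only [Nat.sub_zero, hwp, hset]
    rw [hA, ih (i0 + 1) _ _ (by simp [hlen]) (by omega)]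
    simp [Bool.or_assoc]

-- the 0/1 sort key used by B's port
def bKey (c : String) : Nat := if c = " " then 1 else 0

-- stable insertion keeps a 0-key element at the end of the 0-block
theorem insert_lo (x : String) (hx : bKey x = 0) :
    ∀ (A B : List String), (∀ a ∈ A, bKey a = 0) → (∀ b ∈ B, bKey b = 1) →
    PySem.List.insertBy (fun a b => decide (bKey a < bKey b)) x (A ++ B)
      = (A ++ [x]) ++ B := by
  intro A
  induction A with
  | nil =>
    intro B _ hB
    cases B with
    | nil => simp [PySem.List.insertBy]
    | cons b bs =>
      have hb : bKey b = 1 := hB b (List.mem_cons_self ..)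
      simp [PySem.List.insertBy, hx, hb]
  | cons a as ih =>
    intro B hA hB
    have ha : bKey a = 0 := hA a (List.mem_cons_self ..)
    simp only [List.cons_append, PySem.List.insertBy]
    rw [if_neg (by simp [hx, ha])]
    rw [ih B (fun a' h => hA a' (List.mem_cons_of_mem _ h)) hB]

-- a 1-key element (a space) goes to the very end
theorem insert_hi (x : String) (hx : bKey x = 1) (ys : List String) :
    PySem.List.insertBy (fun a b => decide (bKey a < bKey b)) x ys = ys ++ [x] := by
  apply PySem.List.insertBy_of_forall_not_before
  intro y _
  have hy : bKey y ≤ 1 := by unfold bKey; split <;> omega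
  simp only [hx, decide_eq_false_iff_not, not_lt]
  omega

-- the insertion-sort fold splits the list into the 0-keys then the 1-keys (stably)
theorem fold_split (r : List String) :
    ∀ (A B : List String), (∀ a ∈ A, bKey a = 0) → (∀ b ∈ B, bKey b = 1) →
    r.foldl (fun acc x => PySem.List.insertBy (fun a b => decide (bKey a < bKey b)) x acc) (A ++ B)
      = (A ++ r.filter (fun c => bKey c = 0)) ++ (B ++ r.filter (fun c => bKey c = 1)) := by
  induction r with
  | nil => intro A B _ _; simp
  | cons x xs ih =>
    intro A B hA hB
    simp only [List.foldl_cons]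
    by_cases hx : x = " "
    · have hk : bKey x = 1 := by simp [bKey, hx]
      rw [insert_hi x hk, List.append_assoc]
      rw [ih A (B ++ [x]) hA (by intro b hb; rcases List.mem_append.mp hb with h | h
                                 · exact hB b h
                                 · simp at h; simp [h, hk])]
      have h0 : (x :: xs).filter (fun c => decide (bKey c = 0)) = xs.filter (fun c => decide (bKey c = 0)) := by
        simp [hk]
      have h1 : (x :: xs).filter (fun c => decide (bKey c = 1)) = x :: xs.filter (fun c => decide (bKey c = 1)) := by
        simp [hk]
      rw [h0, h1]
      simp
    · have hk : bKey x = 0 := by simp [bKey, hx]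
      rw [insert_lo x hk A B hA hB]
      rw [ih (A ++ [x]) B (by intro a ha; rcases List.mem_append.mp ha with h | h
                              · exact hA a h
                              · simp at h; simp [h, hk]) hB]
      have h0 : (x :: xs).filter (fun c => decide (bKey c = 0)) = x :: xs.filter (fun c => decide (bKey c = 0)) := by
        simp [hk]
      have h1 : (x :: xs).filter (fun c => decide (bKey c = 1)) = xs.filter (fun c => decide (bKey c = 1)) := by
        simp [hk]
      rw [h0, h1]
      simp

-- B's sorted row is A's packed row (on a row of the matrix's width)
theorem sorted_eq_packRow (r : List String) (n : Nat) (hlen : r.length = n) :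
    PySem.List.sorted r (fun c => if c = " " then (1 : Nat) else 0)
      = r.filter (fun c => c ≠ " ") ++
        List.replicate (n - (r.filter (fun c => c ≠ " ")).length) " " := by
  rw [PySem.List.sorted_eq_foldl_insertBy]
  show List.foldl (fun acc x => PySem.List.insertBy (fun a b => decide (bKey a < bKey b)) x acc)
      ([] ++ []) r = _
  rw [fold_split r [] [] (by simp) (by simp)]
  simp only [List.nil_append]
  have h0 : r.filter (fun c => decide (bKey c = 0)) = r.filter (fun c => c ≠ " ") := by
    apply List.filter_congr
    intro c _
    by_cases hc : c = " " <;> simp [bKey, hc]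
  have h1 : r.filter (fun c => decide (bKey c = 1)) = r.filter (fun c => c = " ") := by
    apply List.filter_congr
    intro c _
    by_cases hc : c = " " <;> simp [bKey, hc]
  have hrep : r.filter (fun c => c = " ")
      = List.replicate ((r.filter (fun c => c = " ")).length) " " := by
    apply List.eq_replicate_of_mem
    intro b hb
    simpa using (List.mem_filter.mp hb).2
  have hlen2 : (r.filter (fun c => c = " ")).length
      = n - (r.filter (fun c => c ≠ " ")).length := by
    have hsum := List.length_eq_length_filter_add (l := r) (fun c : String => decide (c = " "))
    beta_reduce at hsum
    have hneg : r.filter (fun x => !decide (x = " ")) = r.filter (fun c => c ≠ " ") := by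
      apply List.filter_congr
      intro c _
      by_cases hc : c = " " <;> simp [hc]
    rw [hneg] at hsum
    omega
  rw [h0, h1, hrep, hlen2]

-- B's per-row done test reduces to bD
theorem bdone_eq (r : List String) :
    (match PySem.List.index? r " " with
     | some f => (PySem.List.slice r (some ((f : Int) + 1))).any (fun c => c != " ")
     | none => false)
      = bD r := by
  unfold PySem.List.index? bD
  cases h : List.idxOf? " " r with
  | none => simp
  | some f =>
    simp only
    rw [PySem.List.slice_from r (by omega : (0:Int) ≤ (f : Int) + 1)]
    have : ((f : Int) + 1).toNat = f + 1 := by omega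
    rw [this]

-- ===== VERDICT (by name: the statement is the Claim_ definition above) =====
theorem cover_up_py_spec : Claim_equal_cover_up_py := by
  intro mat _ _
  unfold Spec_cover_up_py
  rw [portA_eq]
  have hnew0 : ((List.range mat.length).map
      (fun _ => (List.range mat.length).map (fun _ => " ")) : List (List String))
      = List.replicate mat.length (List.replicate mat.length " ") := by
    simp [List.map_const']
  rw [hnew0]
  have hA := outer_fold mat mat.length 0 [] false rfl (by omega)
  simp only [List.nil_append, Bool.false_or, ← List.range_eq_range'] at hA
  rw [hA]
  show _ = cover_up_py_alt mat
  unfold cover_up_py_alt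
  simp only [List.map_map, List.any_map]
  simp only [Prod.mk.injEq]
  constructor
  · apply List.map_congr_left
    intro i _
    show packRow mat i = PySem.List.sorted (origRow mat i) _
    rw [sorted_eq_packRow (origRow mat i) mat.length (by simp [origRow])]
    rfl
  · exact List.any_congr rfl (fun i => by
      show mv 0 (origRow mat i) = _
      rw [mv_zero_eq_bD]
      exact (bdone_eq (origRow mat i)).symm)
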